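-- pv_equiv track=rewrite | github.com/CovertLab/vEcoli | ecoli/processes/engine_process.py | _get_path_net_depth
-- ===== SOURCE A (Python) =====
-- def _get_path_net_depth(path: tuple[str]) -> int:
--     """
--     Resolve a tuple path to figure out its depth, subtracting one for
--     every ".." encountered.
--     """
--     depth = 0
--     for node in path:
--         if node == "..":
--             depth -= 1
--         else:
--             depth += 1
--     return depth
-- ===== SOURCE B (Python) =====
-- def _get_path_net_depth(path: tuple[str]) -> int:
--     """Closed form: every element contributes +1 except '..' which contributes -1."""
--     return len(path) - 2 * path.count("..")
-- ===== Notes on version B (the rewrite author's own statement) =====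
-- stated objective: simpler
-- what changed: Replaced the +1/-1 accumulator loop with the closed-form expression len(path) - 2*path.count('..').
import Mathlib
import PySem

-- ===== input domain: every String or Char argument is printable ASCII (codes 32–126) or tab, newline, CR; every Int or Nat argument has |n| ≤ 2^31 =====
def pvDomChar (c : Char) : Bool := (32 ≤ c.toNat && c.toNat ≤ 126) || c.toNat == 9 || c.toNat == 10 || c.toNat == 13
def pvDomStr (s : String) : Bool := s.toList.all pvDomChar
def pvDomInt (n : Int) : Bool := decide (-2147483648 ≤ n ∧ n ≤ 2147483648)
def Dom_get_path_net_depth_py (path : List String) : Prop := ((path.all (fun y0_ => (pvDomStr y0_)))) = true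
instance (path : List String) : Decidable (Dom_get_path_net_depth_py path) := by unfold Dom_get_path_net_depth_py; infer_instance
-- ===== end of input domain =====

-- B replaces A's +1/-1 accumulator loop by the closed form len(path) - 2*count('..') (objective: simpler).


-- ===== PORT A =====
def get_path_net_depth_py (path : List String) : Int :=
  path.foldl (fun depth node => if node == ".." then depth - 1 else depth + 1) 0

-- ===== PORT B =====
def get_path_net_depth_py_alt (path : List String) : Int :=
  (path.length : Int) - 2 * (PySem.List.count path ".." : Int)

-- ===== PRECONDITION & SPEC =====
def Spec_get_path_net_depth_py (path : List String) (out : Int) : Prop := out = get_path_net_depth_py_alt path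
instance (path : List String) (out : Int) : Decidable (Spec_get_path_net_depth_py path out) := by unfold Spec_get_path_net_depth_py; infer_instance

-- ===== CLAIM (what is proved, stated in full; the proofs are below) =====
def Claim_equal_get_path_net_depth_py : Prop := ∀ (path : List String), Dom_get_path_net_depth_py path → Spec_get_path_net_depth_py path (get_path_net_depth_py path)

-- ===== LEMMAS AND PROOFS =====
theorem get_path_net_depth_foldl (path : List String) (a : Int) :
    path.foldl (fun depth node => if node == ".." then depth - 1 else depth + 1) a
      = a + (path.length : Int) - 2 * (path.count ".." : Int) := by
  induction path generalizing a with
  | nil => simp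
  | cons x xs ih =>
    simp only [List.foldl_cons, ih, List.length_cons, List.count_cons]
    by_cases h : x = ".."
    · simp [h]; ring
    · simp [h]; ring

-- ===== VERDICT (by name: the statement is the Claim_ definition above) =====
theorem get_path_net_depth_py_spec : Claim_equal_get_path_net_depth_py := by
  intro path _
  unfold Spec_get_path_net_depth_py get_path_net_depth_py get_path_net_depth_py_alt PySem.List.count
  rw [get_path_net_depth_foldl]
  ring
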